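-- pv_equiv track=rewrite | github.com/akhatkulov/algorithms | robocontest/0215.py | son
-- ===== SOURCE A (Python) =====
-- def son(k, n):
--     if n == 0:
--         return 1
--     if n % 2 == 0:
--         x = son(k, n // 2)
--         return x * x
--     else:
--         return k * son(k, n - 1)
-- ===== SOURCE B (Python) =====
-- def son(k, n):
--     result = 1
--     base = k
--     while n > 0:
--         if n % 2 == 1:
--             result = result * base
--         base = base * base
--         n = n // 2
--     return result
-- ===== Notes on version B (the rewrite author's own statement) =====
-- stated objective: alternative
-- what changed: Replaces the recursive square-and-multiply with an iterative bottom-up binary-exponentiation loop over the bits of n (result/base accumulators).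
import Mathlib
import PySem

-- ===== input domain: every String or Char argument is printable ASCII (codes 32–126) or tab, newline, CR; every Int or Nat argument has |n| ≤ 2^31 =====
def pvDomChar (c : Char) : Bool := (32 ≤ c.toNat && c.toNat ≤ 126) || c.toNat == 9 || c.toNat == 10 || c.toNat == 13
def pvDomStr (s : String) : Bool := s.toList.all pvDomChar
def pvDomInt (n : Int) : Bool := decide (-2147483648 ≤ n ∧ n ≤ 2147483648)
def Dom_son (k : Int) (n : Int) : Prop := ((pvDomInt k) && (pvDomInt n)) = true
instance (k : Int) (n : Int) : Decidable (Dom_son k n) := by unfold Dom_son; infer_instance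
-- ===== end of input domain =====

-- B replaces A's recursive square-and-multiply by an iterative binary-exponentiation loop (same cost, different decomposition).


-- ===== PORT A =====
-- A's recursion does not terminate for n < 0 (Python: RecursionError); a fuel of
-- n.toNat + 1 is sufficient for every n ≥ 0 (each call strictly decreases n.toNat),
-- so the fuelled transcription computes exactly A's value on Pre_.
def sonGo (k : Int) (n : Int) : Nat → Int
  | 0 => 0   -- unreachable for n ≥ 0 with fuel n.toNat + 1
  | fuel + 1 =>
    if n = 0 then 1
    else if PySem.Int.mod n 2 = 0 then
      let x := sonGo k (PySem.Int.floordiv n 2) fuel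
      x * x
    else k * sonGo k (n - 1) fuel

def son (k : Int) (n : Int) : Int := sonGo k n (n.toNat + 1)

-- ===== PORT B =====
def sonAltGo (result : Int) (base : Int) (n : Int) : Int :=
  if h : 0 < n then
    sonAltGo (if PySem.Int.mod n 2 = 1 then result * base else result)
      (base * base) (PySem.Int.floordiv n 2)
  else result
termination_by n.toNat
decreasing_by
  have h2 : PySem.Int.floordiv n 2 = n / 2 := PySem.Int.floordiv_eq_ediv_of_pos (by omega)
  simp only [h2]; omega

def son_alt (k : Int) (n : Int) : Int := sonAltGo 1 k n

-- ===== PRECONDITION & SPEC =====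
-- Pre_ excludes n < 0, on which Python A never returns (RecursionError).
def Pre_son (k : Int) (n : Int) : Prop := 0 ≤ n
instance (k : Int) (n : Int) : Decidable (Pre_son k n) := by unfold Pre_son; infer_instance
def pvWitness_son : Int × Int := (3, 5)

def Spec_son (k : Int) (n : Int) (out : Int) : Prop := out = son_alt k n
instance (k : Int) (n : Int) (out : Int) : Decidable (Spec_son k n out) := by unfold Spec_son; infer_instance

-- ===== CLAIM (what is proved, stated in full; the proofs are below) =====
def Claim_equal_son : Prop := ∀ (k : Int) (n : Int), Dom_son k n → Pre_son k n → Spec_son k n (son k n)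

-- ===== LEMMAS AND PROOFS =====

-- A's fuelled recursion computes k ^ n for 0 ≤ n, given enough fuel.
theorem sonGo_eq_pow (k : Int) : ∀ (fuel : Nat) (n : Int), 0 ≤ n → n.toNat < fuel →
    sonGo k n fuel = k ^ n.toNat := by
  intro fuel
  induction fuel with
  | zero => intro n _ h; omega
  | succ f ih =>
    intro n hn hf
    rw [sonGo]
    by_cases h0 : n = 0
    · simp [h0]
    · have hpos : 0 < n := lt_of_le_of_ne hn (Ne.symm h0)
      have hm : PySem.Int.mod n 2 = n % 2 := PySem.Int.mod_eq_emod_of_pos (by omega)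
      have hd : PySem.Int.floordiv n 2 = n / 2 := PySem.Int.floordiv_eq_ediv_of_pos (by omega)
      by_cases he : n % 2 = 0
      · simp only [if_neg h0, hm, he, if_pos, hd]
        rw [ih (n / 2) (by omega) (by omega)]
        have : n.toNat = (n / 2).toNat + (n / 2).toNat := by omega
        rw [this, pow_add]
      · simp only [if_neg h0, hm, if_neg he]
        rw [ih (n - 1) (by omega) (by omega)]
        have : n.toNat = (n - 1).toNat + 1 := by omega
        rw [this, pow_succ]
        ring

-- B's loop invariant: sonAltGo result base n = result * base ^ n.toNat (also for n ≤ 0).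
theorem sonAltGo_eq (result base : Int) (n : Int) :
    sonAltGo result base n = result * base ^ n.toNat := by
  rw [sonAltGo]
  by_cases h : 0 < n
  · have hm : PySem.Int.mod n 2 = n % 2 := PySem.Int.mod_eq_emod_of_pos (by omega)
    have hd : PySem.Int.floordiv n 2 = n / 2 := PySem.Int.floordiv_eq_ediv_of_pos (by omega)
    simp only [dif_pos h, hm, hd]
    rw [sonAltGo_eq]
    have hhalf : (n / 2).toNat = n.toNat / 2 := by omega
    by_cases he : n % 2 = 1
    · simp only [if_pos he, hhalf]
      have : n.toNat = (n.toNat / 2 + n.toNat / 2) + 1 := by omega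
      conv_rhs => rw [this]
      rw [pow_succ, pow_add]
      ring
    · simp only [if_neg he, hhalf]
      have : n.toNat = n.toNat / 2 + n.toNat / 2 := by omega
      conv_rhs => rw [this]
      rw [pow_add]
      ring
  · simp only [dif_neg h]
    have : n.toNat = 0 := by omega
    rw [this, pow_zero, mul_one]
termination_by n.toNat
decreasing_by
  have h2 : PySem.Int.floordiv n 2 = n / 2 := PySem.Int.floordiv_eq_ediv_of_pos (by omega)
  omega

-- ===== VERDICT (by name: the statement is the Claim_ definition above) =====
theorem son_spec : Claim_equal_son := by
  intro k n _ hpre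
  unfold Spec_son son son_alt
  rw [sonGo_eq_pow k (n.toNat + 1) n hpre (by omega), sonAltGo_eq]
  ring
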